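-- pv_equiv track=rewrite | github.com/fagan2888/snake | csc work/final/f15/Q6.py | can_fill_order
-- ===== SOURCE A (Python) =====
-- def can_fill_order(order_dict, inventory_dict):
--     # complete the docstring description to show that 'can_fill_order
--     # does not modify its parameters (2 MARKS)
--     # complete the function body (8 MARKS)
--     ''' (dict of {str: str}, dict of {str: int}) -> bool
--
--     Return True iff the quantity (dict value) of every item (dict key) in
--     inventory_dict is greater than or equal to the quantity of the item ordered
--     in order_dict. If an item in order_dict is not in inventory_dict,
--     return False.
--
--     >>> inventory = {'shirt': 2, 'mug': 2}
--     >>> can_fill_order({'Ann': 'mug', 'Bob': 'mug', 'Lee': 'mug'}, inventory)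
--     False
--     >>> can_fill_order({'Ann': 'shirt', 'Bob': 'mug', 'Lee': 'mug'}, inventory)
--     True
--     >>> can_fill_order({'Ann': 'mug', 'Bob': 'mug', 'Lee': 'hat'}, inventory)
--     False
--     >>> inventory = {'shirt': 2, 'mug': 2}
--     >>> order = {'Ann': 'mug', 'Bob': 'mug'}
--     >>> result = can_fill_order(order, inventory)
--     >>> order == {'Ann': 'mug', 'Bob': 'mug'}
--     True
--     >>> inventory == {'shirt': 2, 'mug': 2}
--     True
--     '''
--
--     order_counts = {}
--     for entry in order_dict:
--         if order_dict[entry] not in order_counts: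
--             order_counts[order_dict[entry]] = 0
--         order_counts[order_dict[entry]] += 1
--
--     for key in order_counts:
--         if key not in inventory_dict or order_counts[key] > inventory_dict[key]:
--             return False
--     return True
-- ===== SOURCE B (Python) =====
-- def can_fill_order(order_dict, inventory_dict):
--     # single pass keeping a running remaining-inventory count; parameters not mutated
--     remaining = dict(inventory_dict)
--     for item in order_dict.values():
--         if item not in remaining:
--             return False
--         remaining[item] -= 1
--         if remaining[item] < 0:
--             return False
--     return True
-- ===== Notes on version B (the rewrite author's own statement) =====
-- stated objective: simpler
-- what changed: Replaces A's two passes (build an order-count dict, then compare it against inventory) with a single pass over the ordered items that decrements a copied remaining-inventory dict and fails fast on a missing item or a count dropping below zero.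
import Mathlib
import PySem

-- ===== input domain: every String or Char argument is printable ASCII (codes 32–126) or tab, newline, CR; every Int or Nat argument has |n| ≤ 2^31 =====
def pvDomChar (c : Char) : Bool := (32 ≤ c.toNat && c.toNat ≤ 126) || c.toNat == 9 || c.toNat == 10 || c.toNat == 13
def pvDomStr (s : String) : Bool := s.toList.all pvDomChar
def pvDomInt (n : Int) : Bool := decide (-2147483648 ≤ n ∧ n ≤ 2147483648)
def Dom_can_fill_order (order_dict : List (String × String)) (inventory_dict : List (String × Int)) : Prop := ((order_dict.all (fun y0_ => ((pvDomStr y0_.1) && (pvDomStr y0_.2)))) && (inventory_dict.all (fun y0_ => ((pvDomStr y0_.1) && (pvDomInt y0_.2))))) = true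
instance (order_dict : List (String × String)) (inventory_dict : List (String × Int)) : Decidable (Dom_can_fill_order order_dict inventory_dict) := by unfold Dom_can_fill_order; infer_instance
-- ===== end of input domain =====

-- B replaces A's two passes (count the order, then compare counts with inventory) by one
-- fail-fast pass that decrements a copied remaining-inventory dict; same return value, no mutation.

-- ===== PORT A =====
-- first loop of A: order_counts[item]: init to 0 if absent, then += 1
def pvStepA (oc : PySem.Dict String Int) (item : String) : PySem.Dict String Int :=
  let oc := if oc.contains item = false then oc.insert item 0 else oc
  oc.modify item 0 (· + 1)

def can_fill_order (order_dict : List (String × String)) (inventory_dict : List (String × Int)) : Bool :=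
  let od := PySem.Dict.ofList order_dict
  let inv := PySem.Dict.ofList inventory_dict
  let order_counts := od.keys.foldl (fun oc entry => pvStepA oc (od.getD entry "")) PySem.Dict.empty
  -- second loop: for key in order_counts: if key not in inventory or counts[key] > inv[key]: return False; return True
  order_counts.keys.all (fun key =>
    !(!(inv.contains key) || decide (order_counts.getD key 0 > inv.getD key 0)))

-- ===== PORT B =====
-- B's loop over order_dict.values(), carrying the remaining-inventory dict
def canFillGo (items : List String) (remaining : PySem.Dict String Int) : Bool :=
  match items with
  | [] => true
  | item :: rest =>
    if !(remaining.contains item) then false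
    else
      let r := remaining.modify item 0 (· - 1)
      if r.getD item 0 < 0 then false
      else canFillGo rest r

def can_fill_order_alt (order_dict : List (String × String)) (inventory_dict : List (String × Int)) : Bool :=
  canFillGo (PySem.Dict.ofList order_dict).values (PySem.Dict.ofList inventory_dict)

-- ===== PRECONDITION & SPEC =====
def Spec_can_fill_order (order_dict : List (String × String)) (inventory_dict : List (String × Int)) (out : Bool) : Prop := out = can_fill_order_alt order_dict inventory_dict
instance (order_dict : List (String × String)) (inventory_dict : List (String × Int)) (out : Bool) : Decidable (Spec_can_fill_order order_dict inventory_dict out) := by unfold Spec_can_fill_order; infer_instance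

-- ===== CLAIM (what is proved, stated in full; the proofs are below) =====
def Claim_equal_can_fill_order : Prop := ∀ (order_dict : List (String × String)) (inventory_dict : List (String × Int)), Dom_can_fill_order order_dict inventory_dict → Spec_can_fill_order order_dict inventory_dict (can_fill_order order_dict inventory_dict)

-- ===== LEMMAS AND PROOFS =====

-- the common specification both programs decide, over the list L of ordered items
def pvOK (L : List String) (inv : PySem.Dict String Int) : Prop :=
  ∀ v ∈ L, inv.contains v = true ∧ (L.count v : Int) ≤ inv.getD v 0

-- A's count dict: lookup
theorem pvCountsA_getD (L : List String) (d : PySem.Dict String Int) (v : String) :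
    (L.foldl pvStepA d).getD v 0 = d.getD v 0 + L.count v := by
  induction L generalizing d with
  | nil => simp
  | cons x rest ih =>
    simp only [List.foldl_cons, ih, List.count_cons]
    have hstep : (pvStepA d x).getD v 0 = d.getD v 0 + if v == x then 1 else 0 := by
      unfold pvStepA
      by_cases hc : d.contains x = false
      · simp only [hc, if_true]
        by_cases hv : v = x
        · subst hv
          rw [PySem.Dict.getD_modify_self, PySem.Dict.getD_insert_self,
              PySem.Dict.getD_of_not_contains d 0 hc]
          simp
        · rw [PySem.Dict.getD_modify_of_ne _ _ _ hv,
              PySem.Dict.getD_insert_of_ne _ _ _ hv]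
          simp [hv]
      · simp only [hc]
        by_cases hv : v = x
        · subst hv; rw [PySem.Dict.getD_modify_self]; simp
        · rw [PySem.Dict.getD_modify_of_ne _ _ _ hv]; simp [hv]
    rw [hstep]
    by_cases hv : v = x
    · subst hv
      simp only [BEq.rfl, if_true]
      push_cast
      ring
    · have hb : (v == x) = false := by simp [hv]
      have hb' : (x == v) = false := by rw [beq_eq_false_iff_ne]; exact fun h => hv h.symm
      simp [hb, hb']

-- A's count dict: key membership
theorem pvCountsA_contains (L : List String) (d : PySem.Dict String Int) (v : String) :
    (L.foldl pvStepA d).contains v = (d.contains v || L.contains v) := by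
  induction L generalizing d with
  | nil => simp
  | cons x rest ih =>
    simp only [List.foldl_cons, ih, List.contains_cons]
    have hstep : (pvStepA d x).contains v = (v == x || d.contains v) := by
      unfold pvStepA
      by_cases hc : d.contains x = false
      · rw [if_pos hc]
        rw [PySem.Dict.contains_modify, PySem.Dict.contains_insert]
        cases hb : (v == x) <;> simp
      · rw [if_neg hc]
        rw [PySem.Dict.contains_modify]
    rw [hstep]
    simp only [Bool.or_assoc, Bool.or_left_comm, Bool.or_comm]

-- A's result decides pvOK
theorem pvA_iff (L : List String) (inv : PySem.Dict String Int) :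
    ((L.foldl pvStepA PySem.Dict.empty).keys.all (fun key =>
      !(!(inv.contains key) || decide ((L.foldl pvStepA PySem.Dict.empty).getD key 0 > inv.getD key 0))) = true)
    ↔ pvOK L inv := by
  rw [List.all_eq_true]
  constructor
  · intro h v hv
    have hmem : v ∈ (L.foldl pvStepA PySem.Dict.empty).keys := by
      rw [← PySem.Dict.contains_iff_mem_keys, pvCountsA_contains]
      simp [hv]
    have := h v hmem
    rw [pvCountsA_getD] at this
    simp only [PySem.Dict.getD_empty, Bool.not_or, Bool.and_eq_true, Bool.not_eq_true',
      decide_eq_false_iff_not, not_lt] at this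
    obtain ⟨h1, h2⟩ := this
    exact ⟨by simpa using h1, by simpa using h2⟩
  · intro h v hv
    rw [← PySem.Dict.contains_iff_mem_keys, pvCountsA_contains] at hv
    simp only [PySem.Dict.contains_empty, Bool.false_or, List.contains_eq_any_beq,
      List.any_eq_true] at hv
    obtain ⟨w, hw, hvw⟩ := hv
    have hvw' : v = w := by simpa using hvw
    subst hvw'
    have := h v hw
    rw [pvCountsA_getD]
    simp only [PySem.Dict.getD_empty, Bool.not_or, Bool.and_eq_true, Bool.not_eq_true',
      decide_eq_false_iff_not, not_lt]
    exact ⟨by simp [this.1], by simpa using this.2⟩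

-- B's loop decides pvOK
theorem pvB_iff (L : List String) (rem : PySem.Dict String Int) :
    (canFillGo L rem = true) ↔ pvOK L rem := by
  induction L generalizing rem with
  | nil => simp [canFillGo, pvOK]
  | cons v rest ih =>
    unfold canFillGo
    by_cases hc : rem.contains v = true
    · rw [if_neg (by simp [hc])]
      have hgetv : (rem.modify v 0 (· - 1)).getD v 0 = rem.getD v 0 - 1 :=
        PySem.Dict.getD_modify_self _ _ _ _
      have hcont : ∀ x, (rem.modify v 0 (· - 1)).contains x = rem.contains x := by
        intro x
        rw [PySem.Dict.contains_modify]
        by_cases hx : x = v <;> simp [hx, hc]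
      by_cases hneg : (rem.modify v 0 (· - 1)).getD v 0 < 0
      · rw [if_pos hneg]
        rw [hgetv] at hneg
        constructor
        · intro h; cases h
        · intro h
          have h2 := (h v (by simp)).2
          have hcnt : 1 ≤ ((v :: rest).count v : Int) := by
            have : 1 ≤ (v :: rest).count v := by simp
            exact_mod_cast this
          omega
      · rw [if_neg hneg, ih]
        rw [hgetv, not_lt] at hneg
        unfold pvOK
        constructor
        · intro h x hx
          by_cases hxv : x = v
          · subst hxv
            refine ⟨hc, ?_⟩
            by_cases hxr : x ∈ rest
            · have h2 := (h x hxr).2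
              rw [hgetv] at h2
              have hcnt : ((x :: rest).count x : Int) = (rest.count x : Int) + 1 := by
                simp
              omega
            · have hcnt : (x :: rest).count x = 1 := by
                simp [List.count_eq_zero_of_not_mem hxr]
              rw [hcnt]; omega
          · have hxr : x ∈ rest := by
              rcases List.mem_cons.mp hx with h' | h'
              · exact absurd h' hxv
              · exact h'
            have h2 := h x hxr
            rw [hcont x, PySem.Dict.getD_modify_of_ne _ _ _ hxv] at h2
            refine ⟨h2.1, ?_⟩
            have hcnt : (v :: rest).count x = rest.count x := List.count_cons_of_ne (fun h => hxv h.symm)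
            rw [hcnt] at *
            omega
        · intro h x hx
          rw [hcont x]
          by_cases hxv : x = v
          · subst hxv
            refine ⟨hc, ?_⟩
            rw [hgetv]
            have h2 := (h x (by simp)).2
            have hcnt : ((x :: rest).count x : Int) = (rest.count x : Int) + 1 := by
              simp
            omega
          · have h2 := h x (List.mem_cons_of_mem _ hx)
            rw [PySem.Dict.getD_modify_of_ne _ _ _ hxv]
            refine ⟨h2.1, ?_⟩
            have hcnt : (v :: rest).count x = rest.count x := List.count_cons_of_ne (fun h => hxv h.symm)
            rw [hcnt] at h2
            omega
    · rw [if_pos (by simp [Bool.not_eq_true] at hc ⊢; exact hc)]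
      constructor
      · intro h; cases h
      · intro h
        exact absurd ((h v (by simp)).1) hc

-- ===== VERDICT (by name: the statement is the Claim_ definition above) =====
theorem can_fill_order_spec : Claim_equal_can_fill_order := by
  intro order_dict inventory_dict _
  unfold Spec_can_fill_order
  simp only [can_fill_order, can_fill_order_alt]
  rw [PySem.Dict.values_eq_map_keys _ (PySem.Dict.nodup_keys_ofList order_dict) ""]
  rw [Bool.eq_iff_iff, pvB_iff]
  rw [← List.foldl_map]
  exact pvA_iff _ _
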